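-- pv_equiv track=rewrite | github.com/resumetozero/multi-model-med-sight-via-reasoning | data/rocov2_data.py | get_clinical_metadata
-- ===== SOURCE A (Python) =====
-- def get_clinical_metadata(text):
--     """Dynamic metadata extraction to overcome lack of structure in ROCOv2."""
--     text = text.lower()
--     meta = {"modality": "Other", "anatomy": "General"}
--
--     # Modality detection
--     if any(x in text for x in ["ct", "computed tomography"]): meta["modality"] = "CT"
--     elif any(x in text for x in ["x-ray", "radiograph", "chest unit"]): meta["modality"] = "X-ray"
--     elif any(x in text for x in ["mri", "magnetic resonance"]): meta["modality"] = "MRI"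
--     elif any(x in text for x in ["ultrasound", "us ", "sonography"]): meta["modality"] = "Ultrasound"
--
--     # Anatomy detection
--     if any(x in text for x in ["chest", "lung", "pleural", "thorax"]): meta["anatomy"] = "Chest"
--     elif any(x in text for x in ["head", "brain", "skull", "cth"]): meta["anatomy"] = "Head"
--     elif any(x in text for x in ["abdomen", "pelvis", "liver", "renal"]): meta["anatomy"] = "Abdomen"
--     elif any(x in text for x in ["bone", "fracture", "arm", "leg", "spine"]): meta["anatomy"] = "Musculoskeletal"
--
--     return meta
-- ===== SOURCE B (Python) =====
-- # One flat keyword table; a single pass keeps, per category, the lowest-rank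
-- # matched entry (a running minimum) instead of ordered if/elif chains.
-- FLAT_KEYWORDS = [
--     ("modality", 0, "CT", "ct"),
--     ("modality", 0, "CT", "computed tomography"),
--     ("modality", 1, "X-ray", "x-ray"),
--     ("modality", 1, "X-ray", "radiograph"),
--     ("modality", 1, "X-ray", "chest unit"),
--     ("modality", 2, "MRI", "mri"),
--     ("modality", 2, "MRI", "magnetic resonance"),
--     ("modality", 3, "Ultrasound", "ultrasound"),
--     ("modality", 3, "Ultrasound", "us "),
--     ("modality", 3, "Ultrasound", "sonography"),
--     ("anatomy", 0, "Chest", "chest"),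
--     ("anatomy", 0, "Chest", "lung"),
--     ("anatomy", 0, "Chest", "pleural"),
--     ("anatomy", 0, "Chest", "thorax"),
--     ("anatomy", 1, "Head", "head"),
--     ("anatomy", 1, "Head", "brain"),
--     ("anatomy", 1, "Head", "skull"),
--     ("anatomy", 1, "Head", "cth"),
--     ("anatomy", 2, "Abdomen", "abdomen"),
--     ("anatomy", 2, "Abdomen", "pelvis"),
--     ("anatomy", 2, "Abdomen", "liver"),
--     ("anatomy", 2, "Abdomen", "renal"),
--     ("anatomy", 3, "Musculoskeletal", "bone"),
--     ("anatomy", 3, "Musculoskeletal", "fracture"),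
--     ("anatomy", 3, "Musculoskeletal", "arm"),
--     ("anatomy", 3, "Musculoskeletal", "leg"),
--     ("anatomy", 3, "Musculoskeletal", "spine"),
-- ]
-- DEFAULTS = [("modality", "Other"), ("anatomy", "General")]
--
--
-- def get_clinical_metadata(text):
--     """Dynamic metadata extraction to overcome lack of structure in ROCOv2."""
--     text = text.lower()
--     best = {}  # category -> (rank, label), running minimum over matched keywords
--     for cat, rank, label, kw in FLAT_KEYWORDS:
--         if kw in text and (cat not in best or rank < best[cat][0]):
--             best[cat] = (rank, label)
--     return {cat: best[cat][1] if cat in best else dflt for cat, dflt in DEFAULTS}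
-- ===== Notes on version B (the rewrite author's own statement) =====
-- stated objective: alternative
-- what changed: Replaced the two short-circuiting if/elif chains with a single exhaustive pass over one flat keyword table that keeps, per category, the matched entry of minimal rank (a running-minimum reduction, no early exit), defaults filled in at the end.
import Mathlib
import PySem

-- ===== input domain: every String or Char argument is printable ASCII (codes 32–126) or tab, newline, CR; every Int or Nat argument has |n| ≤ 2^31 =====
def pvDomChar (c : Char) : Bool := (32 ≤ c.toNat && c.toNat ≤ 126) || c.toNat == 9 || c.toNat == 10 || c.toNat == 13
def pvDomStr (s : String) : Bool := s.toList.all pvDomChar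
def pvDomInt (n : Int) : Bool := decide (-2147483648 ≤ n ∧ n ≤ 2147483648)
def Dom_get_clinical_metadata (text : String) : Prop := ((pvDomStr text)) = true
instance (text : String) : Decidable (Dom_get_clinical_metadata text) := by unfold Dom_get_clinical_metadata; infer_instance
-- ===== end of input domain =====

-- B replaces A's two short-circuiting if/elif chains by one exhaustive pass over a
-- flat keyword table keeping the minimal-rank match per category (alternative, same cost).

-- ===== PORT A =====
def get_clinical_metadata (text : String) : List (String × String) :=
  let t := PySem.Str.lower text
  let m : PySem.Dict String String :=
    PySem.Dict.ofList [("modality", "Other"), ("anatomy", "General")]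
  let m :=
    if ["ct", "computed tomography"].any (fun x => PySem.Str.isIn x t) then
      m.insert "modality" "CT"
    else if ["x-ray", "radiograph", "chest unit"].any (fun x => PySem.Str.isIn x t) then
      m.insert "modality" "X-ray"
    else if ["mri", "magnetic resonance"].any (fun x => PySem.Str.isIn x t) then
      m.insert "modality" "MRI"
    else if ["ultrasound", "us ", "sonography"].any (fun x => PySem.Str.isIn x t) then
      m.insert "modality" "Ultrasound"
    else m
  let m :=
    if ["chest", "lung", "pleural", "thorax"].any (fun x => PySem.Str.isIn x t) then
      m.insert "anatomy" "Chest"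
    else if ["head", "brain", "skull", "cth"].any (fun x => PySem.Str.isIn x t) then
      m.insert "anatomy" "Head"
    else if ["abdomen", "pelvis", "liver", "renal"].any (fun x => PySem.Str.isIn x t) then
      m.insert "anatomy" "Abdomen"
    else if ["bone", "fracture", "arm", "leg", "spine"].any (fun x => PySem.Str.isIn x t) then
      m.insert "anatomy" "Musculoskeletal"
    else m
  m.items

-- ===== PORT B =====
-- one flat row per keyword: (category, rank, label, keyword)
def pvFlatKeywords : List (String × Nat × String × String) :=
  [("modality", 0, "CT", "ct"),
   ("modality", 0, "CT", "computed tomography"),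
   ("modality", 1, "X-ray", "x-ray"),
   ("modality", 1, "X-ray", "radiograph"),
   ("modality", 1, "X-ray", "chest unit"),
   ("modality", 2, "MRI", "mri"),
   ("modality", 2, "MRI", "magnetic resonance"),
   ("modality", 3, "Ultrasound", "ultrasound"),
   ("modality", 3, "Ultrasound", "us "),
   ("modality", 3, "Ultrasound", "sonography"),
   ("anatomy", 0, "Chest", "chest"),
   ("anatomy", 0, "Chest", "lung"),
   ("anatomy", 0, "Chest", "pleural"),
   ("anatomy", 0, "Chest", "thorax"),
   ("anatomy", 1, "Head", "head"),
   ("anatomy", 1, "Head", "brain"),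
   ("anatomy", 1, "Head", "skull"),
   ("anatomy", 1, "Head", "cth"),
   ("anatomy", 2, "Abdomen", "abdomen"),
   ("anatomy", 2, "Abdomen", "pelvis"),
   ("anatomy", 2, "Abdomen", "liver"),
   ("anatomy", 2, "Abdomen", "renal"),
   ("anatomy", 3, "Musculoskeletal", "bone"),
   ("anatomy", 3, "Musculoskeletal", "fracture"),
   ("anatomy", 3, "Musculoskeletal", "arm"),
   ("anatomy", 3, "Musculoskeletal", "leg"),
   ("anatomy", 3, "Musculoskeletal", "spine")]

def pvDefaults : List (String × String) := [("modality", "Other"), ("anatomy", "General")]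

-- the loop body: keep the matched entry of minimal rank per category
def pvBestStep (t : String) (best : PySem.Dict String (Nat × String))
    (row : String × Nat × String × String) : PySem.Dict String (Nat × String) :=
  if PySem.Str.isIn row.2.2.2 t &&
      (match best.get? row.1 with
       | none => true
       | some cur => decide (row.2.1 < cur.1)) then
    best.insert row.1 (row.2.1, row.2.2.1)
  else best

def get_clinical_metadata_alt (text : String) : List (String × String) :=
  let t := PySem.Str.lower text
  let best := pvFlatKeywords.foldl (pvBestStep t) PySem.Dict.empty
  pvDefaults.map (fun cd =>
    (cd.1, match best.get? cd.1 with
           | some rl => rl.2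
           | none => cd.2))

-- ===== PRECONDITION & SPEC =====
def Spec_get_clinical_metadata (text : String) (out : List (String × String)) : Prop := out = get_clinical_metadata_alt text
instance (text : String) (out : List (String × String)) : Decidable (Spec_get_clinical_metadata text out) := by unfold Spec_get_clinical_metadata; infer_instance

-- ===== CLAIM (what is proved, stated in full; the proofs are below) =====
def Claim_equal_get_clinical_metadata : Prop := ∀ (text : String), Dom_get_clinical_metadata text → Spec_get_clinical_metadata text (get_clinical_metadata text)

-- ===== LEMMAS AND PROOFS =====

-- the flat rows of one keyword group: category c, rank k, label L
def pvGroup (c : String) (k : Nat) (L : String) (kws : List String) :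
    List (String × Nat × String × String) :=
  kws.map (fun kw => (c, k, L, kw))

theorem pvGroup_cons (c : String) (k : Nat) (L : String) (kw : String) (kws : List String) :
    pvGroup c k L (kw :: kws) = (c, k, L, kw) :: pvGroup c k L kws := rfl

-- once the dict holds (r, l) at key c with r ≤ k, a rank-k group of category c changes nothing
theorem pvStay (t : String) (c : String) (k : Nat) (L : String) (kws : List String)
    (d : PySem.Dict String (Nat × String)) (r : Nat) (l : String)
    (hd : d.get? c = some (r, l)) (hrk : r ≤ k) :
    List.foldl (pvBestStep t) d (pvGroup c k L kws) = d := by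
  induction kws with
  | nil => rfl
  | cons kw kws ih =>
    rw [pvGroup_cons, List.foldl_cons,
        show pvBestStep t d (c, k, L, kw) = d from by
          simp [pvBestStep, hd, Nat.not_lt.mpr hrk]]
    exact ih

-- from a dict with no entry at c, a group folds to "insert iff any keyword matches"
theorem pvGroupFold (t : String) (c : String) (k : Nat) (L : String) (kws : List String)
    (d : PySem.Dict String (Nat × String)) (hd : d.get? c = none) :
    List.foldl (pvBestStep t) d (pvGroup c k L kws) =
      if kws.any (fun x => PySem.Str.isIn x t) then d.insert c (k, L) else d := by
  induction kws with
  | nil => rfl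
  | cons kw kws ih =>
    rw [pvGroup_cons, List.foldl_cons]
    by_cases h : PySem.Chars.isIn kw.toList t.toList = true
    · rw [show pvBestStep t d (c, k, L, kw) = d.insert c (k, L) from by
          simp [pvBestStep, hd, h],
        pvStay t c k L kws (d.insert c (k, L)) k L
          (PySem.Dict.get?_insert_self d c (k, L)) (Nat.le_refl k)]
      simp [h]
    · rw [show pvBestStep t d (c, k, L, kw) = d from by simp [pvBestStep, h], ih]
      simp [List.any_cons, h]

theorem pvModChar (t : String) :
    List.foldl (pvBestStep t) (PySem.Dict.empty : PySem.Dict String (Nat × String))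
      (pvGroup "modality" 0 "CT" ["ct", "computed tomography"] ++
       pvGroup "modality" 1 "X-ray" ["x-ray", "radiograph", "chest unit"] ++
       pvGroup "modality" 2 "MRI" ["mri", "magnetic resonance"] ++
       pvGroup "modality" 3 "Ultrasound" ["ultrasound", "us ", "sonography"]) =
    (if ["ct", "computed tomography"].any (fun x => PySem.Str.isIn x t) then
      (PySem.Dict.empty : PySem.Dict String (Nat × String)).insert "modality" ((0 : Nat), "CT")
    else if ["x-ray", "radiograph", "chest unit"].any (fun x => PySem.Str.isIn x t) then
      (PySem.Dict.empty : PySem.Dict String (Nat × String)).insert "modality" ((1 : Nat), "X-ray")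
    else if ["mri", "magnetic resonance"].any (fun x => PySem.Str.isIn x t) then
      (PySem.Dict.empty : PySem.Dict String (Nat × String)).insert "modality" ((2 : Nat), "MRI")
    else if ["ultrasound", "us ", "sonography"].any (fun x => PySem.Str.isIn x t) then
      (PySem.Dict.empty : PySem.Dict String (Nat × String)).insert "modality" ((3 : Nat), "Ultrasound")
    else (PySem.Dict.empty : PySem.Dict String (Nat × String))) := by
  simp only [List.foldl_append]
  rw [pvGroupFold t "modality" 0 "CT" ["ct", "computed tomography"]
      (PySem.Dict.empty : PySem.Dict String (Nat × String)) (by decide)]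
  by_cases h1 : (["ct", "computed tomography"].any (fun x => PySem.Str.isIn x t)) = true
  · conv_lhs => rw [if_pos h1]
    rw [pvStay t "modality" 1 "X-ray" ["x-ray", "radiograph", "chest unit"]
        ((PySem.Dict.empty : PySem.Dict String (Nat × String)).insert "modality" ((0 : Nat), "CT")) 0 "CT" (PySem.Dict.get?_insert_self _ _ _) (by decide)]
    rw [pvStay t "modality" 2 "MRI" ["mri", "magnetic resonance"]
        ((PySem.Dict.empty : PySem.Dict String (Nat × String)).insert "modality" ((0 : Nat), "CT")) 0 "CT" (PySem.Dict.get?_insert_self _ _ _) (by decide)]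
    rw [pvStay t "modality" 3 "Ultrasound" ["ultrasound", "us ", "sonography"]
        ((PySem.Dict.empty : PySem.Dict String (Nat × String)).insert "modality" ((0 : Nat), "CT")) 0 "CT" (PySem.Dict.get?_insert_self _ _ _) (by decide)]
    conv_rhs => rw [if_pos h1]
  · conv_lhs => rw [if_neg h1]
    rw [pvGroupFold t "modality" 1 "X-ray" ["x-ray", "radiograph", "chest unit"]
        (PySem.Dict.empty : PySem.Dict String (Nat × String)) (by decide)]
    by_cases h2 : (["x-ray", "radiograph", "chest unit"].any (fun x => PySem.Str.isIn x t)) = true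
    · conv_lhs => rw [if_pos h2]
      rw [pvStay t "modality" 2 "MRI" ["mri", "magnetic resonance"]
          ((PySem.Dict.empty : PySem.Dict String (Nat × String)).insert "modality" ((1 : Nat), "X-ray")) 1 "X-ray" (PySem.Dict.get?_insert_self _ _ _) (by decide)]
      rw [pvStay t "modality" 3 "Ultrasound" ["ultrasound", "us ", "sonography"]
          ((PySem.Dict.empty : PySem.Dict String (Nat × String)).insert "modality" ((1 : Nat), "X-ray")) 1 "X-ray" (PySem.Dict.get?_insert_self _ _ _) (by decide)]
      conv_rhs => rw [if_neg h1, if_pos h2]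
    · conv_lhs => rw [if_neg h2]
      rw [pvGroupFold t "modality" 2 "MRI" ["mri", "magnetic resonance"]
          (PySem.Dict.empty : PySem.Dict String (Nat × String)) (by decide)]
      by_cases h3 : (["mri", "magnetic resonance"].any (fun x => PySem.Str.isIn x t)) = true
      · conv_lhs => rw [if_pos h3]
        rw [pvStay t "modality" 3 "Ultrasound" ["ultrasound", "us ", "sonography"]
            ((PySem.Dict.empty : PySem.Dict String (Nat × String)).insert "modality" ((2 : Nat), "MRI")) 2 "MRI" (PySem.Dict.get?_insert_self _ _ _) (by decide)]
        conv_rhs => rw [if_neg h1, if_neg h2, if_pos h3]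
      · conv_lhs => rw [if_neg h3]
        rw [pvGroupFold t "modality" 3 "Ultrasound" ["ultrasound", "us ", "sonography"]
            (PySem.Dict.empty : PySem.Dict String (Nat × String)) (by decide)]
        by_cases h4 : (["ultrasound", "us ", "sonography"].any (fun x => PySem.Str.isIn x t)) = true
        · conv_lhs => rw [if_pos h4]
          conv_rhs => rw [if_neg h1, if_neg h2, if_neg h3, if_pos h4]
        · conv_lhs => rw [if_neg h4]
          conv_rhs => rw [if_neg h1, if_neg h2, if_neg h3, if_neg h4]

theorem pvAnaChar (t : String) (d : PySem.Dict String (Nat × String))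
    (hd : d.get? "anatomy" = none) :
    List.foldl (pvBestStep t) d
      (pvGroup "anatomy" 0 "Chest" ["chest", "lung", "pleural", "thorax"] ++
       pvGroup "anatomy" 1 "Head" ["head", "brain", "skull", "cth"] ++
       pvGroup "anatomy" 2 "Abdomen" ["abdomen", "pelvis", "liver", "renal"] ++
       pvGroup "anatomy" 3 "Musculoskeletal" ["bone", "fracture", "arm", "leg", "spine"]) =
    (if ["chest", "lung", "pleural", "thorax"].any (fun x => PySem.Str.isIn x t) then
      d.insert "anatomy" ((0 : Nat), "Chest")
    else if ["head", "brain", "skull", "cth"].any (fun x => PySem.Str.isIn x t) then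
      d.insert "anatomy" ((1 : Nat), "Head")
    else if ["abdomen", "pelvis", "liver", "renal"].any (fun x => PySem.Str.isIn x t) then
      d.insert "anatomy" ((2 : Nat), "Abdomen")
    else if ["bone", "fracture", "arm", "leg", "spine"].any (fun x => PySem.Str.isIn x t) then
      d.insert "anatomy" ((3 : Nat), "Musculoskeletal")
    else d) := by
  simp only [List.foldl_append]
  rw [pvGroupFold t "anatomy" 0 "Chest" ["chest", "lung", "pleural", "thorax"]
      d hd]
  by_cases h1 : (["chest", "lung", "pleural", "thorax"].any (fun x => PySem.Str.isIn x t)) = true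
  · conv_lhs => rw [if_pos h1]
    rw [pvStay t "anatomy" 1 "Head" ["head", "brain", "skull", "cth"]
        (d.insert "anatomy" ((0 : Nat), "Chest")) 0 "Chest" (PySem.Dict.get?_insert_self _ _ _) (by decide)]
    rw [pvStay t "anatomy" 2 "Abdomen" ["abdomen", "pelvis", "liver", "renal"]
        (d.insert "anatomy" ((0 : Nat), "Chest")) 0 "Chest" (PySem.Dict.get?_insert_self _ _ _) (by decide)]
    rw [pvStay t "anatomy" 3 "Musculoskeletal" ["bone", "fracture", "arm", "leg", "spine"]
        (d.insert "anatomy" ((0 : Nat), "Chest")) 0 "Chest" (PySem.Dict.get?_insert_self _ _ _) (by decide)]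
    conv_rhs => rw [if_pos h1]
  · conv_lhs => rw [if_neg h1]
    rw [pvGroupFold t "anatomy" 1 "Head" ["head", "brain", "skull", "cth"]
        d hd]
    by_cases h2 : (["head", "brain", "skull", "cth"].any (fun x => PySem.Str.isIn x t)) = true
    · conv_lhs => rw [if_pos h2]
      rw [pvStay t "anatomy" 2 "Abdomen" ["abdomen", "pelvis", "liver", "renal"]
          (d.insert "anatomy" ((1 : Nat), "Head")) 1 "Head" (PySem.Dict.get?_insert_self _ _ _) (by decide)]
      rw [pvStay t "anatomy" 3 "Musculoskeletal" ["bone", "fracture", "arm", "leg", "spine"]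
          (d.insert "anatomy" ((1 : Nat), "Head")) 1 "Head" (PySem.Dict.get?_insert_self _ _ _) (by decide)]
      conv_rhs => rw [if_neg h1, if_pos h2]
    · conv_lhs => rw [if_neg h2]
      rw [pvGroupFold t "anatomy" 2 "Abdomen" ["abdomen", "pelvis", "liver", "renal"]
          d hd]
      by_cases h3 : (["abdomen", "pelvis", "liver", "renal"].any (fun x => PySem.Str.isIn x t)) = true
      · conv_lhs => rw [if_pos h3]
        rw [pvStay t "anatomy" 3 "Musculoskeletal" ["bone", "fracture", "arm", "leg", "spine"]
            (d.insert "anatomy" ((2 : Nat), "Abdomen")) 2 "Abdomen" (PySem.Dict.get?_insert_self _ _ _) (by decide)]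
        conv_rhs => rw [if_neg h1, if_neg h2, if_pos h3]
      · conv_lhs => rw [if_neg h3]
        rw [pvGroupFold t "anatomy" 3 "Musculoskeletal" ["bone", "fracture", "arm", "leg", "spine"]
            d hd]
        by_cases h4 : (["bone", "fracture", "arm", "leg", "spine"].any (fun x => PySem.Str.isIn x t)) = true
        · conv_lhs => rw [if_pos h4]
          conv_rhs => rw [if_neg h1, if_neg h2, if_neg h3, if_pos h4]
        · conv_lhs => rw [if_neg h4]
          conv_rhs => rw [if_neg h1, if_neg h2, if_neg h3, if_neg h4]

theorem pvFlatSplit : pvFlatKeywords =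
    (pvGroup "modality" 0 "CT" ["ct", "computed tomography"] ++
     pvGroup "modality" 1 "X-ray" ["x-ray", "radiograph", "chest unit"] ++
     pvGroup "modality" 2 "MRI" ["mri", "magnetic resonance"] ++
     pvGroup "modality" 3 "Ultrasound" ["ultrasound", "us ", "sonography"]) ++
    (pvGroup "anatomy" 0 "Chest" ["chest", "lung", "pleural", "thorax"] ++
     pvGroup "anatomy" 1 "Head" ["head", "brain", "skull", "cth"] ++
     pvGroup "anatomy" 2 "Abdomen" ["abdomen", "pelvis", "liver", "renal"] ++
     pvGroup "anatomy" 3 "Musculoskeletal" ["bone", "fracture", "arm", "leg", "spine"]) := by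
  decide

-- ===== VERDICT (by name: the statement is the Claim_ definition above) =====
theorem get_clinical_metadata_spec : Claim_equal_get_clinical_metadata := by
  intro text _
  unfold Spec_get_clinical_metadata
  simp only [get_clinical_metadata, get_clinical_metadata_alt]
  rw [pvFlatSplit, List.foldl_append, pvModChar,
      pvAnaChar _ _ (by split_ifs <;> decide)]
  split_ifs <;> rfl
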